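-- pv_equiv track=rewrite | github.com/itseluriiiiii/ai_agents_arnav | src/email_generator.py | _parse_ai_generated_content
-- ===== SOURCE A (Python) =====
-- def _parse_ai_generated_content(ai_content: str) -> str:
--     """Parse AI generated content to extract the main body."""
--     lines = ai_content.strip().split('\n')
--     content_lines = []
--
--     # Look for email body content
--     in_body = False
--     for line in lines:
--         line = line.strip()
--         if not line:
--             continue
--
--         # Skip obvious headers
--         if any(header in line.lower() for header in ['subject:', 'from:', 'to:', 'date:']):
--             continue
--
--         # Start collecting body content
--         if not in_body and len(line) > 10:
--             in_body = True
--
--         if in_body: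
--             content_lines.append(line)
--
--     return '\n'.join(content_lines)
-- ===== SOURCE B (Python) =====
-- def _parse_ai_generated_content(ai_content: str) -> str:
--     """Recursive skip/collect over the line list: no in_body latch, no accumulator list.
--
--     _skip discards lines until it meets a kept line longer than 10 chars; from there
--     _collect recursively gathers every remaining kept line. Built by structural
--     recursion on the list of lines instead of an iterative stateful loop.
--     """
--     headers = ('subject:', 'from:', 'to:', 'date:')
--
--     def _keep(ln):
--         return bool(ln) and not any(h in ln.lower() for h in headers)
--
--     def _collect(lines):
--         if not lines:
--             return []
--         ln = lines[0].strip()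
--         rest = _collect(lines[1:])
--         return [ln] + rest if _keep(ln) else rest
--
--     def _skip(lines):
--         if not lines:
--             return []
--         ln = lines[0].strip()
--         if _keep(ln) and len(ln) > 10:
--             return [ln] + _collect(lines[1:])
--         return _skip(lines[1:])
--
--     return '\n'.join(_skip(ai_content.strip().split('\n')))
-- ===== Notes on version B (the rewrite author's own statement) =====
-- stated objective: alternative
-- what changed: Replaces A's single stateful loop with an in_body latch and accumulator list by two structurally recursive functions: _skip recurses past the prefix up to the first kept line longer than 10 chars, then hands off to _collect, which recursively gathers the remaining kept lines.
import Mathlib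
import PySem

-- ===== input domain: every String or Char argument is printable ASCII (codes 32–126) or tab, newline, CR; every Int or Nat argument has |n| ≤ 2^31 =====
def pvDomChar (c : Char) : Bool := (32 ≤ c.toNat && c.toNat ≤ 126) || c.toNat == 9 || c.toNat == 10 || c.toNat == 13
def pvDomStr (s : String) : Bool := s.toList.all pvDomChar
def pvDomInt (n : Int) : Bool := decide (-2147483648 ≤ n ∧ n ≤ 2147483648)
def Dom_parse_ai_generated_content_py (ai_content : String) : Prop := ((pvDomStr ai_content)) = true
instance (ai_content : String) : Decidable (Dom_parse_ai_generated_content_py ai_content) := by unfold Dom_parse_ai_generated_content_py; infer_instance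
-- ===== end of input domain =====

-- B replaces A's stateful in_body latch loop by two structurally recursive functions
-- (skip the prefix up to the first long kept line, then collect the remaining kept
-- lines); same values, same cost (objective: alternative).


-- ===== PORT A =====
-- the body of A's for-loop, on state (content_lines, in_body)
def pvStepA (st : List String × Bool) (rawline : String) : List String × Bool :=
  let line := PySem.Str.strip rawline
  if line == "" then st
  else if ["subject:", "from:", "to:", "date:"].any
      (fun h => PySem.Str.isIn h (PySem.Str.lower line)) then st
  else
    let in_body := if !st.2 && 10 < PySem.Str.len line then true else st.2
    if in_body then (st.1 ++ [line], in_body) else (st.1, in_body)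

def parse_ai_generated_content_py (ai_content : String) : String :=
  let lines := (PySem.Str.split? (PySem.Str.strip ai_content) "\n").getD []
  PySem.Str.join "\n" (lines.foldl pvStepA ([], false)).1

-- ===== PORT B =====
-- Source B's _keep: non-empty and not a header line
def pvKeepB (ln : String) : Bool :=
  (ln != "") && !(["subject:", "from:", "to:", "date:"].any
      (fun h => PySem.Str.isIn h (PySem.Str.lower ln)))

-- Source B's _collect: recursively gather every remaining kept stripped line
def pvCollectB : List String → List String
  | [] => []
  | x :: rest =>
    let ln := PySem.Str.strip x
    if pvKeepB ln then ln :: pvCollectB rest else pvCollectB rest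

-- Source B's _skip: recurse past lines until a kept line longer than 10, then collect
def pvSkipB : List String → List String
  | [] => []
  | x :: rest =>
    let ln := PySem.Str.strip x
    if pvKeepB ln && decide (10 < PySem.Str.len ln) then ln :: pvCollectB rest
    else pvSkipB rest

def parse_ai_generated_content_py_alt (ai_content : String) : String :=
  PySem.Str.join "\n" (pvSkipB ((PySem.Str.split? (PySem.Str.strip ai_content) "\n").getD []))

-- ===== PRECONDITION & SPEC =====
def Spec_parse_ai_generated_content_py (ai_content : String) (out : String) : Prop := out = parse_ai_generated_content_py_alt ai_content
instance (ai_content : String) (out : String) : Decidable (Spec_parse_ai_generated_content_py ai_content out) := by unfold Spec_parse_ai_generated_content_py; infer_instance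

-- ===== CLAIM (what is proved, stated in full; the proofs are below) =====
def Claim_equal_parse_ai_generated_content_py : Prop := ∀ (ai_content : String), Dom_parse_ai_generated_content_py ai_content → Spec_parse_ai_generated_content_py ai_content (parse_ai_generated_content_py ai_content)

-- ===== LEMMAS AND PROOFS =====
-- the kept-line step of A: latch in_body, append once latched
def pvBody (st : List String × Bool) (line : String) : List String × Bool :=
  let b := if !st.2 && 10 < PySem.Str.len line then true else st.2
  if b then (st.1 ++ [line], b) else (st.1, b)

theorem pvStepA_eq (st : List String × Bool) (rawline : String) :
    pvStepA st rawline =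
      if pvKeepB (PySem.Str.strip rawline) then pvBody st (PySem.Str.strip rawline) else st := by
  simp only [pvStepA, pvKeepB, pvBody]
  split_ifs with h1 h2 h3 h4 h5 <;> simp_all

theorem foldl_stepA_eq (lines : List String) (st : List String × Bool) :
    lines.foldl pvStepA st = ((lines.map PySem.Str.strip).filter pvKeepB).foldl pvBody st := by
  induction lines generalizing st with
  | nil => rfl
  | cons x rest ih =>
    simp only [List.foldl_cons, List.map_cons, List.filter_cons, pvStepA_eq]
    by_cases h : pvKeepB (PySem.Str.strip x) <;> simp [h, ih]

theorem foldl_body_true (fs : List String) (acc : List String) :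
    fs.foldl pvBody (acc, true) = (acc ++ fs, true) := by
  induction fs generalizing acc with
  | nil => simp
  | cons x rest ih => simp [pvBody, ih]

theorem pvCollectB_eq (lines : List String) :
    pvCollectB lines = (lines.map PySem.Str.strip).filter pvKeepB := by
  induction lines with
  | nil => rfl
  | cons x rest ih =>
    simp only [pvCollectB, List.map_cons, List.filter_cons]
    by_cases h : pvKeepB (PySem.Str.strip x) <;> simp [h, ih]

theorem foldl_body_skip (lines : List String) (acc : List String) :
    (((lines.map PySem.Str.strip).filter pvKeepB).foldl pvBody (acc, false)).1 =
      acc ++ pvSkipB lines := by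
  induction lines generalizing acc with
  | nil => simp [pvSkipB]
  | cons x rest ih =>
    simp only [List.map_cons, List.filter_cons, pvSkipB]
    by_cases hk : pvKeepB (PySem.Str.strip x)
    · by_cases hl : 10 < (PySem.Chars.strip x.toList).length
      · have hl2 : 10 < PySem.Str.len (PySem.Str.strip x) := by
          simpa [PySem.Str.len, PySem.Str.strip] using hl
        have hb : pvBody (acc, false) (PySem.Str.strip x) =
            (acc ++ [PySem.Str.strip x], true) := by
          simp [pvBody, hl]
        simp only [hk, Bool.true_and, decide_eq_true_eq]
        rw [if_pos hl2]
        simp [hb, foldl_body_true, pvCollectB_eq]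
      · have hl2 : ¬ 10 < PySem.Str.len (PySem.Str.strip x) := by
          simpa [PySem.Str.len, PySem.Str.strip] using hl
        have hb : pvBody (acc, false) (PySem.Str.strip x) = (acc, false) := by
          simp [pvBody, hl]
        simp only [hk, Bool.true_and, decide_eq_true_eq]
        rw [if_neg hl2]
        simp [hb, ih]
    · simp [hk, ih]

-- ===== VERDICT (by name: the statement is the Claim_ definition above) =====
theorem parse_ai_generated_content_py_spec : Claim_equal_parse_ai_generated_content_py := by
  intro ai_content _
  unfold Spec_parse_ai_generated_content_py parse_ai_generated_content_py parse_ai_generated_content_py_alt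
  simp only [foldl_stepA_eq]
  simp [foldl_body_skip]
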